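-- pv_equiv track=rewrite | github.com/shangar21/hacker_rank_solutions | gridland_metro.py | gridlandMetro
-- ===== SOURCE A (Python) =====
-- def gridlandMetro(n,m,k,track):
--     #n -> number of rows
--     #m -> number of columns
--     #k -> number of tracks
--     #track -> 2D array [row start, column start, column end]
--     ranges = {}
--     for i in track:
--         if i[0] not in ranges:
--             ranges[i[0]] = [(i[1],i[2])]
--         else:
--             ranges[i[0]].append((i[1],i[2]))
--
--     for i in ranges:
--         ranges[i].sort()
--
--     count = 0
--     total = n*m
--
--     for i in ranges:
--         s = ranges[i][0][0]
--         e = ranges[i][0][1]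
--         for j in ranges[i]:
--             if j[0] > e:
--                 total -= e - s + 1
--                 s = j[0]
--                 e = j[1]
--             if j[1] > e:
--                 e = j[1]
--         total -= e - s + 1
--
--     return total
-- ===== SOURCE B (Python) =====
-- def gridlandMetro(n, m, k, track):
--     # Rebuild each row's intervals by filtering, instead of grouping with a dict:
--     # iterate the distinct row ids in sorted order, sort that row's (start, end)
--     # pairs, and accumulate the occupied count with a single elif-merge sweep;
--     # free cells = n*m - occupied.
--     occupied = 0
--     for r in sorted(set(t[0] for t in track)):
--         ivs = sorted((t[1], t[2]) for t in track if t[0] == r)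
--         s, e = ivs[0]
--         for a, b in ivs:
--             if a > e:
--                 occupied += e - s + 1
--                 s, e = a, b
--             elif b > e:
--                 e = b
--         occupied += e - s + 1
--     return n * m - occupied
-- ===== Notes on version B (the rewrite author's own statement) =====
-- stated objective: alternative
-- what changed: B drops A's dict-of-rows grouping and per-key in-place sort loop: it iterates the sorted distinct row ids and, for each, re-extracts that row's (start, end) pairs from the input by filtering, sorts them, and accumulates the occupied count with a single elif-merge sweep, returning n*m minus the accumulated total instead of subtracting from a running total.
import Mathlib
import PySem

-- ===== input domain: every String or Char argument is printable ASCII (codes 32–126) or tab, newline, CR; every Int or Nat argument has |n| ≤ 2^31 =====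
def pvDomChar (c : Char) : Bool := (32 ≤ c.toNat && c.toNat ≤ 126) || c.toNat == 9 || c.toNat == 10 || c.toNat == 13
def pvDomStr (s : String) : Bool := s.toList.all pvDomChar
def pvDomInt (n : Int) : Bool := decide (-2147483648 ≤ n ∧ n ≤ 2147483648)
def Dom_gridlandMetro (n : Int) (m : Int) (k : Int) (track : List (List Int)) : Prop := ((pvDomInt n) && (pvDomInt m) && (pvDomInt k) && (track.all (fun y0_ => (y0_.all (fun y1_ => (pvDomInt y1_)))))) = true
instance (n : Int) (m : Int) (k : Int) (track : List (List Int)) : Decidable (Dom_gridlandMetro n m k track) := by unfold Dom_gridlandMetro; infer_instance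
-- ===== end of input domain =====

-- B replaces A's dict-of-rows grouping by iterating the sorted distinct row ids and
-- filtering each row's intervals out of the input directly (objective: alternative
-- decomposition, no speed claim).

-- ===== PORT A =====
-- i[0], i[1], i[2] are ported as pyGetD with default 0; Pre_ guarantees every row has
-- length ≥ 3, so the default is never used on admitted inputs (Python raises IndexError
-- on shorter rows).  ranges[i] in the loops over the dict is ported as getD _ [] — the
-- key is always present there.  A's 'count = 0' is dead code and not ported.
def gridlandMetro (n : Int) (m : Int) (k : Int) (track : List (List Int)) : Int :=
  let ranges : PySem.Dict Int (List (Int × Int)) :=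
    track.foldl (fun d i =>
      if d.contains (PySem.List.pyGetD i 0 0) = false then
        d.insert (PySem.List.pyGetD i 0 0) [(PySem.List.pyGetD i 1 0, PySem.List.pyGetD i 2 0)]
      else
        d.modify (PySem.List.pyGetD i 0 0) [] (fun l => l ++ [(PySem.List.pyGetD i 1 0, PySem.List.pyGetD i 2 0)]))
      PySem.Dict.empty
  let ranges := ranges.keys.foldl (fun d i => d.modify i [] (fun l => PySem.List.sorted2 l Prod.fst Prod.snd)) ranges
  let total := n * m
  let total := ranges.keys.foldl (fun total i =>
    let ps := ranges.getD i []
    let s := (PySem.List.pyGetD ps 0 (0, 0)).1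
    let e := (PySem.List.pyGetD ps 0 (0, 0)).2
    let st := ps.foldl (fun (acc : Int × Int × Int) j =>
        let acc := if j.1 > acc.2.2 then (acc.1 - (acc.2.2 - acc.2.1 + 1), j.1, j.2) else acc
        if j.2 > acc.2.2 then (acc.1, acc.2.1, j.2) else acc)
      (total, s, e)
    st.1 - (st.2.2 - st.2.1 + 1)) total
  total

-- ===== PORT B =====
-- t[0], t[1], t[2] ported as pyGetD with default 0 (Pre_ keeps the defaults unused);
-- ivs[0] ported as pyGetD _ 0 (0,0) — ivs is nonempty for every distinct row id.
def gridlandMetro_alt (n : Int) (m : Int) (k : Int) (track : List (List Int)) : Int :=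
  let occupied := (PySem.List.sorted (PySem.Set.ofList (track.map (fun t => PySem.List.pyGetD t 0 0))) (fun x => x)).foldl
    (fun occupied r =>
      let ivs := PySem.List.sorted2 ((track.filter (fun t => PySem.List.pyGetD t 0 0 == r)).map
          (fun t => (PySem.List.pyGetD t 1 0, PySem.List.pyGetD t 2 0))) Prod.fst Prod.snd
      let s := (PySem.List.pyGetD ivs 0 (0, 0)).1
      let e := (PySem.List.pyGetD ivs 0 (0, 0)).2
      let st := ivs.foldl (fun (acc : Int × Int × Int) ab =>
          if ab.1 > acc.2.2 then (acc.1 + (acc.2.2 - acc.2.1 + 1), ab.1, ab.2)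
          else if ab.2 > acc.2.2 then (acc.1, acc.2.1, ab.2)
          else acc)
        (occupied, s, e)
      st.1 + (st.2.2 - st.2.1 + 1)) 0
  n * m - occupied

-- ===== PRECONDITION & SPEC =====
-- Pre_ excludes exactly the inputs where Python A raises IndexError: a track row with
-- fewer than three entries.
def Pre_gridlandMetro (n : Int) (m : Int) (k : Int) (track : List (List Int)) : Prop :=
  ∀ r ∈ track, 3 ≤ r.length
instance (n : Int) (m : Int) (k : Int) (track : List (List Int)) : Decidable (Pre_gridlandMetro n m k track) := by unfold Pre_gridlandMetro; infer_instance
def pvWitness_gridlandMetro : Int × Int × Int × List (List Int) := (2, 3, 1, [[1, 1, 2]])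

def Spec_gridlandMetro (n : Int) (m : Int) (k : Int) (track : List (List Int)) (out : Int) : Prop := out = gridlandMetro_alt n m k track
instance (n : Int) (m : Int) (k : Int) (track : List (List Int)) (out : Int) : Decidable (Spec_gridlandMetro n m k track out) := by unfold Spec_gridlandMetro; infer_instance

-- ===== CLAIM (what is proved, stated in full; the proofs are below) =====
def Claim_equal_gridlandMetro : Prop := ∀ (n : Int) (m : Int) (k : Int) (track : List (List Int)), Dom_gridlandMetro n m k track → Pre_gridlandMetro n m k track → Spec_gridlandMetro n m k track (gridlandMetro n m k track)

-- ===== LEMMAS AND PROOFS =====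

-- proof-side abbreviations
def pvKey (t : List Int) : Int := PySem.List.pyGetD t 0 0
def pvPair (t : List Int) : Int × Int := (PySem.List.pyGetD t 1 0, PySem.List.pyGetD t 2 0)
def pvGrp (track : List (List Int)) (r : Int) : List (Int × Int) :=
  (track.filter (fun t => pvKey t == r)).map pvPair
def pvAStep (acc : Int × Int × Int) (j : Int × Int) : Int × Int × Int :=
  let acc := if j.1 > acc.2.2 then (acc.1 - (acc.2.2 - acc.2.1 + 1), j.1, j.2) else acc
  if j.2 > acc.2.2 then (acc.1, acc.2.1, j.2) else acc
def pvBStep (acc : Int × Int × Int) (ab : Int × Int) : Int × Int × Int :=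
  if ab.1 > acc.2.2 then (acc.1 + (acc.2.2 - acc.2.1 + 1), ab.1, ab.2)
  else if ab.2 > acc.2.2 then (acc.1, acc.2.1, ab.2)
  else acc
-- the per-row occupied count both programs compute
def pvG (track : List (List Int)) (r : Int) : Int :=
  let ps := PySem.List.sorted2 (pvGrp track r) Prod.fst Prod.snd
  let p0 := PySem.List.pyGetD ps 0 (0, 0)
  let st := ps.foldl pvBStep (0, p0.1, p0.2)
  st.1 + (st.2.2 - st.2.1 + 1)


lemma pv_bstep_shift (ps : List (Int × Int)) : ∀ c s e : Int,
    ps.foldl pvBStep (c, s, e) =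
      (c + (ps.foldl pvBStep (0, s, e)).1, (ps.foldl pvBStep (0, s, e)).2) := by
  induction ps with
  | nil => intro c s e; simp
  | cons ab ps ih =>
    intro c s e
    simp only [List.foldl_cons]
    have hstep : pvBStep (c, s, e) ab = (c + (pvBStep (0, s, e) ab).1, (pvBStep (0, s, e) ab).2) := by
      simp only [pvBStep]
      split_ifs <;> simp
    rw [hstep]
    rcases hb : pvBStep (0, s, e) ab with ⟨c', s', e'⟩
    rw [ih (c + c') s' e', ih c' s' e']
    simp [add_assoc]

lemma pv_astep_eq (ps : List (Int × Int)) : ∀ t s e : Int,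
    ps.foldl pvAStep (t, s, e) =
      (t - (ps.foldl pvBStep (0, s, e)).1, (ps.foldl pvBStep (0, s, e)).2) := by
  induction ps with
  | nil => intro t s e; simp
  | cons ab ps ih =>
    intro t s e
    simp only [List.foldl_cons]
    have hstep : pvAStep (t, s, e) ab = (t - (pvBStep (0, s, e) ab).1, (pvBStep (0, s, e) ab).2) := by
      simp only [pvAStep, pvBStep]
      split_ifs <;> simp_all
    rw [hstep]
    rcases hb : pvBStep (0, s, e) ab with ⟨c', s', e'⟩
    rw [ih (t - c') s' e', pv_bstep_shift ps c' s' e']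
    simp
    omega

lemma pv_foldl_sub (ks : List Int) (g : Int → Int) : ∀ a : Int,
    ks.foldl (fun t r => t - g r) a = a - (ks.map g).sum := by
  induction ks with
  | nil => intro a; simp
  | cons i ks ih => intro a; simp [ih]; omega

-- the branchy dict-building step of port A is the plain modify step
lemma pv_build_eq_modify (track : List (List Int)) :
    track.foldl (fun d i =>
      if d.contains (PySem.List.pyGetD i 0 0) = false then
        d.insert (PySem.List.pyGetD i 0 0) [(PySem.List.pyGetD i 1 0, PySem.List.pyGetD i 2 0)]
      else
        d.modify (PySem.List.pyGetD i 0 0) [] (fun l => l ++ [(PySem.List.pyGetD i 1 0, PySem.List.pyGetD i 2 0)]))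
      PySem.Dict.empty
    = track.foldl (fun d i =>
        d.modify (PySem.List.pyGetD i 0 0) [] (fun l => l ++ [(PySem.List.pyGetD i 1 0, PySem.List.pyGetD i 2 0)]))
      PySem.Dict.empty := by
  apply PySem.List.foldl_congr_mem
  intro d i _
  by_cases h : d.contains (PySem.List.pyGetD i 0 0) = false
  · simp [h, PySem.Dict.modify, PySem.Dict.getD_of_not_contains d [] h]
  · simp [h]

lemma pv_build_getD (track : List (List Int)) (r : Int) :
    (track.foldl (fun d i =>
        d.modify (PySem.List.pyGetD i 0 0) [] (fun l => l ++ [(PySem.List.pyGetD i 1 0, PySem.List.pyGetD i 2 0)]))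
      PySem.Dict.empty).getD r []
    = pvGrp track r := by
  have h := PySem.Dict.getD_foldl_modify_append
      (track.map (fun i => (PySem.List.pyGetD i 0 0, (PySem.List.pyGetD i 1 0, PySem.List.pyGetD i 2 0))))
      PySem.Dict.empty r
  rw [List.foldl_map] at h
  simp only [PySem.Dict.getD_empty, List.nil_append, List.filter_map, List.map_map] at h
  rw [h]
  simp [pvGrp, pvKey, pvPair, Function.comp_def]

lemma pv_build_keys (track : List (List Int)) :
    (track.foldl (fun d i =>
        d.modify (PySem.List.pyGetD i 0 0) [] (fun l => l ++ [(PySem.List.pyGetD i 1 0, PySem.List.pyGetD i 2 0)]))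
      PySem.Dict.empty).keys
    = PySem.Set.ofList (track.map (fun t => PySem.List.pyGetD t 0 0)) := by
  have h := PySem.Dict.keys_foldl_modify_key track (fun i => PySem.List.pyGetD i 0 0) []
      (fun _ i => fun l => l ++ [(PySem.List.pyGetD i 1 0, PySem.List.pyGetD i 2 0)]) PySem.Dict.empty
  simp only [PySem.Dict.keys_empty, PySem.Set.update_nil_left] at h
  exact h

lemma pv_build_nodup (track : List (List Int)) :
    (track.foldl (fun d i =>
        d.modify (PySem.List.pyGetD i 0 0) [] (fun l => l ++ [(PySem.List.pyGetD i 1 0, PySem.List.pyGetD i 2 0)]))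
      PySem.Dict.empty).keys.Nodup := by
  exact PySem.Dict.nodup_keys_foldl_modify_key track (fun i => PySem.List.pyGetD i 0 0) []
      (fun _ i => fun l => l ++ [(PySem.List.pyGetD i 1 0, PySem.List.pyGetD i 2 0)]) PySem.Dict.empty
      PySem.Dict.nodup_keys_empty

-- the per-key sorting loop, over a duplicate-free key list
lemma pv_sortfold_getD (ks : List Int) : ∀ d : PySem.Dict Int (List (Int × Int)), ks.Nodup → ∀ r : Int,
    (ks.foldl (fun d i => d.modify i [] (fun l => PySem.List.sorted2 l Prod.fst Prod.snd)) d).getD r []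
    = if r ∈ ks then PySem.List.sorted2 (d.getD r []) Prod.fst Prod.snd else d.getD r [] := by
  induction ks with
  | nil => intro d _ r; simp
  | cons i ks ih =>
    intro d hnd r
    simp only [List.foldl_cons]
    rw [ih _ (List.Nodup.of_cons hnd) r]
    by_cases hri : r = i
    · subst hri
      have hrk : r ∉ ks := (List.nodup_cons.mp hnd).1
      simp [hrk, PySem.Dict.getD_modify_self]
    · simp [PySem.Dict.getD_modify, hri]

lemma pv_sortfold_keys (ks : List Int) : ∀ d : PySem.Dict Int (List (Int × Int)),
    (∀ i ∈ ks, d.contains i = true) →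
    (ks.foldl (fun d i => d.modify i [] (fun l => PySem.List.sorted2 l Prod.fst Prod.snd)) d).keys = d.keys := by
  induction ks with
  | nil => intro d _; simp
  | cons i ks ih =>
    intro d hc
    simp only [List.foldl_cons]
    rw [ih _ ?_]
    · rw [PySem.Dict.keys_modify, PySem.Dict.keys_insert_of_contains d _ (hc i (List.mem_cons_self))]
    · intro j hj
      rw [PySem.Dict.contains_modify]
      simp [hc j (List.mem_cons_of_mem _ hj)]

-- port A computes n*m minus the per-row occupied counts, rows in dict insertion order
lemma pv_A_eq (n m k : Int) (track : List (List Int)) :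
    gridlandMetro n m k track
    = n * m - ((PySem.Set.ofList (track.map (fun t => PySem.List.pyGetD t 0 0))).map (pvG track)).sum := by
  unfold gridlandMetro
  rw [pv_build_eq_modify, ← pv_build_keys track]
  set D1 := track.foldl (fun d i =>
      d.modify (PySem.List.pyGetD i 0 0) [] (fun l => l ++ [(PySem.List.pyGetD i 1 0, PySem.List.pyGetD i 2 0)]))
    PySem.Dict.empty with hD1
  show (List.foldl (fun total i =>
      let ps := (D1.keys.foldl (fun d i => d.modify i [] (fun l => PySem.List.sorted2 l Prod.fst Prod.snd)) D1).getD i []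
      let s := (PySem.List.pyGetD ps 0 (0, 0)).1
      let e := (PySem.List.pyGetD ps 0 (0, 0)).2
      let st := ps.foldl (fun (acc : Int × Int × Int) j =>
          let acc := if j.1 > acc.2.2 then (acc.1 - (acc.2.2 - acc.2.1 + 1), j.1, j.2) else acc
          if j.2 > acc.2.2 then (acc.1, acc.2.1, j.2) else acc)
        (total, s, e)
      st.1 - (st.2.2 - st.2.1 + 1)) (n * m)
      (D1.keys.foldl (fun d i => d.modify i [] (fun l => PySem.List.sorted2 l Prod.fst Prod.snd)) D1).keys)
    = n * m - (D1.keys.map (pvG track)).sum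
  set D2 := D1.keys.foldl (fun d i => d.modify i [] (fun l => PySem.List.sorted2 l Prod.fst Prod.snd)) D1 with hD2
  have hnd : D1.keys.Nodup := by rw [hD1]; exact pv_build_nodup track
  have hkeys : D2.keys = D1.keys := by
    rw [hD2]
    exact pv_sortfold_keys D1.keys D1 (fun i hi => (PySem.Dict.contains_iff_mem_keys D1 i).mpr hi)
  rw [hkeys]
  have hbody : ∀ (total : Int), ∀ i ∈ D1.keys,
      (fun (total : Int) (i : Int) =>
        let ps := D2.getD i []
        let s := (PySem.List.pyGetD ps 0 (0, 0)).1
        let e := (PySem.List.pyGetD ps 0 (0, 0)).2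
        let st := ps.foldl (fun (acc : Int × Int × Int) j =>
            let acc := if j.1 > acc.2.2 then (acc.1 - (acc.2.2 - acc.2.1 + 1), j.1, j.2) else acc
            if j.2 > acc.2.2 then (acc.1, acc.2.1, j.2) else acc)
          (total, s, e)
        st.1 - (st.2.2 - st.2.1 + 1)) total i
      = total - pvG track i := by
    intro total i hi
    have hps : D2.getD i [] = PySem.List.sorted2 (pvGrp track i) Prod.fst Prod.snd := by
      rw [hD2, pv_sortfold_getD D1.keys D1 hnd i, if_pos hi, hD1, pv_build_getD]
    simp only [hps]
    have hstep : (fun (acc : Int × Int × Int) (j : Int × Int) =>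
        let acc := if j.1 > acc.2.2 then (acc.1 - (acc.2.2 - acc.2.1 + 1), j.1, j.2) else acc
        if j.2 > acc.2.2 then (acc.1, acc.2.1, j.2) else acc) = pvAStep := rfl
    rw [hstep, pv_astep_eq]
    simp [pvG]
    omega
  rw [PySem.List.foldl_congr_mem D1.keys _ (fun total i => total - pvG track i) (n * m) hbody]
  rw [pv_foldl_sub]

-- port B computes n*m minus the same per-row counts, rows in sorted order
lemma pv_B_eq (n m k : Int) (track : List (List Int)) :
    gridlandMetro_alt n m k track
    = n * m - ((PySem.List.sorted (PySem.Set.ofList (track.map (fun t => PySem.List.pyGetD t 0 0))) (fun x => x)).map (pvG track)).sum := by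
  unfold gridlandMetro_alt
  show n * m - (List.foldl (fun occupied r =>
      let ivs := PySem.List.sorted2 ((track.filter (fun t => PySem.List.pyGetD t 0 0 == r)).map
          (fun t => (PySem.List.pyGetD t 1 0, PySem.List.pyGetD t 2 0))) Prod.fst Prod.snd
      let s := (PySem.List.pyGetD ivs 0 (0, 0)).1
      let e := (PySem.List.pyGetD ivs 0 (0, 0)).2
      let st := ivs.foldl (fun (acc : Int × Int × Int) ab =>
          if ab.1 > acc.2.2 then (acc.1 + (acc.2.2 - acc.2.1 + 1), ab.1, ab.2)
          else if ab.2 > acc.2.2 then (acc.1, acc.2.1, ab.2)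
          else acc)
        (occupied, s, e)
      st.1 + (st.2.2 - st.2.1 + 1)) 0
      (PySem.List.sorted (PySem.Set.ofList (track.map (fun t => PySem.List.pyGetD t 0 0))) (fun x => x)))
    = _
  have hbody : ∀ (occupied : Int), ∀ r ∈ PySem.List.sorted (PySem.Set.ofList (track.map (fun t => PySem.List.pyGetD t 0 0))) (fun x => x),
      (fun (occupied : Int) (r : Int) =>
        let ivs := PySem.List.sorted2 ((track.filter (fun t => PySem.List.pyGetD t 0 0 == r)).map
            (fun t => (PySem.List.pyGetD t 1 0, PySem.List.pyGetD t 2 0))) Prod.fst Prod.snd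
        let s := (PySem.List.pyGetD ivs 0 (0, 0)).1
        let e := (PySem.List.pyGetD ivs 0 (0, 0)).2
        let st := ivs.foldl (fun (acc : Int × Int × Int) ab =>
            if ab.1 > acc.2.2 then (acc.1 + (acc.2.2 - acc.2.1 + 1), ab.1, ab.2)
            else if ab.2 > acc.2.2 then (acc.1, acc.2.1, ab.2)
            else acc)
          (occupied, s, e)
        st.1 + (st.2.2 - st.2.1 + 1)) occupied r
      = occupied + pvG track r := by
    intro occupied r _
    have hgrp : (track.filter (fun t => PySem.List.pyGetD t 0 0 == r)).map
        (fun t => (PySem.List.pyGetD t 1 0, PySem.List.pyGetD t 2 0)) = pvGrp track r := by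
      simp [pvGrp, pvKey, pvPair]
    have hstep : (fun (acc : Int × Int × Int) (ab : Int × Int) =>
        if ab.1 > acc.2.2 then (acc.1 + (acc.2.2 - acc.2.1 + 1), ab.1, ab.2)
        else if ab.2 > acc.2.2 then (acc.1, acc.2.1, ab.2)
        else acc) = pvBStep := rfl
    simp only [hgrp, hstep]
    rw [pv_bstep_shift]
    simp [pvG]
    omega
  rw [PySem.List.foldl_congr_mem _ _ (fun occupied r => occupied + pvG track r) 0 hbody]
  rw [PySem.List.foldl_add]
  simp

-- ===== VERDICT (by name: the statement is the Claim_ definition above) =====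
theorem gridlandMetro_spec : Claim_equal_gridlandMetro := by
  intro n m k track _ _
  unfold Spec_gridlandMetro
  rw [pv_A_eq, pv_B_eq]
  have hperm := (PySem.List.sorted_perm (PySem.Set.ofList (track.map (fun t => PySem.List.pyGetD t 0 0))) (fun x => x) false).map (pvG track)
  rw [hperm.sum_eq]
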